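-- pv_equiv track=rewrite | github.com/taksqth/codeforces | codeforces-841/test.py | dp_factor_parity
-- ===== SOURCE A (Python) =====
-- def dp_factor_parity(limit=200005):
--     def prime_up_to(n):
--         notprime = [False] * (limit + 1)
--         primes = []
--         for i in range(2, n + 1):
--             if not notprime[i]:
--                 primes.append(i)
--             for j in range(i, n + 1, i):
--                 notprime[j] = True
--         return primes
--
--     primes = prime_up_to(limit)
--     dp = [0] * limit
--     dp[0] = 0
--     dp[1] = 0
--     for i in range(2, limit):
--         even = False
--         ci = i
--         for prime in primes:
--             if prime**2 > i:
--                 break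
--             cnt = 0
--             while ci % prime == 0:
--                 ci //= prime
--                 cnt += 1
--             if cnt % 2 == 1:
--                 even = True
--                 break
--         if even or ci > 1:
--             dp[i] = 1
--     return dp
-- ===== SOURCE B (Python) =====
-- def dp_factor_parity(limit=200005):
--     # i has all prime exponents even  <=>  i is a perfect square,
--     # so just mark the perfect squares below limit with 0.
--     dp = [1] * limit if limit > 0 else []
--     k = 0
--     while k * k < limit:
--         dp[k * k] = 0
--         k += 1
--     return dp
-- ===== Notes on version B (the rewrite author's own statement) =====
-- stated objective: faster
-- what changed: A sieves all primes below limit and trial-divides every i to test whether all prime exponents are even; B uses the fact that this holds exactly for perfect squares and simply zeroes the indices k*k in an all-ones array.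
-- outside the precondition, e.g. on dp_factor_parity(1): A raises IndexError, B returns [0]; on dp_factor_parity(0): A raises IndexError, B returns []
import Mathlib
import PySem

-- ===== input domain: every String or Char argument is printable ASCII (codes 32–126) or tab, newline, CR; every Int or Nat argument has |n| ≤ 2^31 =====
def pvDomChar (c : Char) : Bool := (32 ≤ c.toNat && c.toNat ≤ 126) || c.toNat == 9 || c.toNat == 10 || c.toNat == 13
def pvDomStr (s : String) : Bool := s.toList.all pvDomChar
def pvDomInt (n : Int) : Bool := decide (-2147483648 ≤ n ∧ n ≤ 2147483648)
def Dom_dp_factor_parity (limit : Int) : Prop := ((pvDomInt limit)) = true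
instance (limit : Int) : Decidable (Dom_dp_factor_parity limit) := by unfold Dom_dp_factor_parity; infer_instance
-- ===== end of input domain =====

-- B marks the perfect squares directly instead of A's sieve + per-index trial division
-- (objective: faster; equivalence is about the return value on limit ≥ 2, where A returns).

-- ===== PORT A =====
-- range(i, n+1, i): the multiples of i from i up to n (exact for i ≥ 1; the sieve only uses i ≥ 2)
def pvMults (i n : Nat) : List Nat := (List.range (n / i)).map (fun t => (t + 1) * i)

-- for j in range(i, n+1, i): notprime[j] = True
def pvMark (np : List Bool) (l : List Nat) : List Bool := l.foldl (fun a j => a.set j true) np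

-- one iteration of the sieve loop: read notprime[i] (append i if unmarked), then mark multiples
def pvSieveStep (n : Nat) (st : List Bool × List Nat) (i : Nat) : List Bool × List Nat :=
  (pvMark st.1 (pvMults i n), if st.1.getD i false = false then st.2 ++ [i] else st.2)

-- prime_up_to(n) with notprime of size `size` (A calls it with n = limit, size = limit+1)
def pvSieve (n size : Nat) : List Nat :=
  ((List.range' 2 (n - 1)).foldl (pvSieveStep n) (List.replicate size false, [])).2

-- while ci % prime == 0: ci //= prime; cnt += 1  (the 0 < ci / 2 ≤ p guards only make the
-- recursion total; in A's executions ci ≥ 1 and p ≥ 2 always hold, so they never change the value)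
def pvDivOut (ci p : Nat) : Nat × Nat :=
  if h : 2 ≤ p ∧ 0 < ci ∧ ci % p = 0 then
    let r := pvDivOut (ci / p) p
    (r.1, r.2 + 1)
  else (ci, 0)
termination_by ci
decreasing_by exact Nat.div_lt_self h.2.1 (by omega)

-- the 'for prime in primes' loop with its two breaks; returns (even, ci)
def pvInner (i : Nat) : List Nat → Nat → Bool × Nat
  | [], ci => (false, ci)
  | p :: rest, ci =>
    if p * p > i then (false, ci)
    else
      let r := pvDivOut ci p
      if r.2 % 2 = 1 then (true, r.1)
      else pvInner i rest r.1

-- body of 'for i in range(2, limit)': dp[i] = 1 if even or ci > 1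
def pvDpStep (primes : List Nat) (dp : List Int) (i : Nat) : List Int :=
  let r := pvInner i primes i
  if r.1 = true ∨ 1 < r.2 then dp.set i 1 else dp

def dp_factor_parity (limit : Int) : List Int :=
  let n := limit.toNat
  let primes := pvSieve n (n + 1)
  (List.range' 2 (n - 2)).foldl (pvDpStep primes)
    (((List.replicate n (0 : Int)).set 0 0).set 1 0)

-- ===== PORT B =====
-- while k * k < limit: dp[k*k] = 0; k += 1
def pvBLoop (limit k : Nat) (dp : List Int) : List Int :=
  if h : k * k < limit then pvBLoop limit (k + 1) (dp.set (k * k) 0) else dp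
termination_by limit - k
decreasing_by
  have hk : k ≤ k * k := by nlinarith
  omega

def dp_factor_parity_alt (limit : Int) : List Int :=
  pvBLoop limit.toNat 0 (List.replicate limit.toNat 1)

-- ===== PRECONDITION & SPEC =====
-- A raises IndexError for limit ≤ 1 (dp[0] = 0 / dp[1] = 0 on a list shorter than 2); Pre_
-- excludes exactly those inputs.
def Pre_dp_factor_parity (limit : Int) : Prop := 2 ≤ limit
instance (limit : Int) : Decidable (Pre_dp_factor_parity limit) := by
  unfold Pre_dp_factor_parity; infer_instance

def pvWitness_dp_factor_parity : Int := 12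

def Spec_dp_factor_parity (limit : Int) (out : List Int) : Prop := out = dp_factor_parity_alt limit
instance (limit : Int) (out : List Int) : Decidable (Spec_dp_factor_parity limit out) := by
  unfold Spec_dp_factor_parity; infer_instance

-- ===== CLAIM (what is proved, stated in full; the proofs are below) =====
def Claim_equal_dp_factor_parity : Prop := ∀ (limit : Int), Dom_dp_factor_parity limit → Pre_dp_factor_parity limit → Spec_dp_factor_parity limit (dp_factor_parity limit)

-- ===== LEMMAS AND PROOFS =====

-- the common specification both ports are reduced to: flag 0 at perfect squares, 1 elsewhere
def sqFlag (i : Nat) : Int := if Nat.sqrt i * Nat.sqrt i = i then 0 else 1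
def specList (n : Nat) : List Int := (List.range n).map sqFlag

-- the primes ≤ n, in increasing order
def primesL (n : Nat) : List Nat := (List.range' 2 (n - 1)).filter (fun p => decide (Nat.Prime p))

lemma mem_primesL (n q : Nat) (hn : 2 ≤ n) : q ∈ primesL n ↔ Nat.Prime q ∧ q ≤ n := by
  simp only [primesL, List.mem_filter, List.mem_range'_1, decide_eq_true_eq]
  constructor
  · rintro ⟨⟨h2, hlt⟩, hp⟩; exact ⟨hp, by omega⟩
  · rintro ⟨hp, hle⟩; exact ⟨⟨hp.two_le, by omega⟩, hp⟩

lemma pairwise_primesL (n : Nat) : (primesL n).Pairwise (· < ·) :=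
  List.Pairwise.sublist List.filter_sublist (List.pairwise_lt_range' 1)

lemma sq_iff_even_fact (n : Nat) (hn : n ≠ 0) :
    Nat.sqrt n * Nat.sqrt n = n ↔ ∀ q, Nat.Prime q → Even (n.factorization q) := by
  constructor
  · intro h q _
    have hm : Nat.sqrt n ≠ 0 := by
      intro h0
      rw [h0] at h
      simp at h
      exact hn h.symm
    rw [← h, Nat.factorization_mul hm hm]
    exact ⟨(Nat.sqrt n).factorization q, Finsupp.add_apply _ _ _⟩
  · intro h
    have key : ∀ p ∈ n.factorization.support,
        p ^ (n.factorization p / 2) * p ^ (n.factorization p / 2) = p ^ (n.factorization p) := by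
      intro p hp
      have hq : Nat.Prime p :=
        Nat.prime_of_mem_primeFactors (by rwa [Nat.support_factorization] at hp)
      obtain ⟨r, hr⟩ := h p hq
      rw [← pow_add]
      congr 1
      omega
    have hmm : (n.factorization.prod fun p k => p ^ (k / 2)) *
        (n.factorization.prod fun p k => p ^ (k / 2)) = n := by
      rw [Finsupp.prod, ← Finset.prod_mul_distrib]
      rw [Finset.prod_congr rfl key]
      have := Nat.prod_factorization_pow_eq_self hn
      rwa [Finsupp.prod] at this
    have hsq : Nat.sqrt n = n.factorization.prod fun p k => p ^ (k / 2) := by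
      conv_lhs => rw [← hmm, ← pow_two]
      exact Nat.sqrt_eq' _
    rw [hsq]
    exact hmm

lemma pvDivOut_spec (p : Nat) (hp : 2 ≤ p) : ∀ ci, 0 < ci →
    (pvDivOut ci p).1 * p ^ (pvDivOut ci p).2 = ci ∧ ¬ p ∣ (pvDivOut ci p).1 ∧
      0 < (pvDivOut ci p).1 := by
  intro ci
  induction ci using Nat.strong_induction_on with
  | _ ci ih =>
    intro hci
    rw [pvDivOut]
    by_cases h : 2 ≤ p ∧ 0 < ci ∧ ci % p = 0
    · rw [dif_pos h]
      have hdvd : p ∣ ci := Nat.dvd_of_mod_eq_zero h.2.2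
      have hlt : ci / p < ci := Nat.div_lt_self hci (by omega)
      have hpos : 0 < ci / p := Nat.div_pos (Nat.le_of_dvd hci hdvd) (by omega)
      obtain ⟨h1, h2, h3⟩ := ih (ci / p) hlt hpos
      refine ⟨?_, h2, h3⟩
      simp only [pow_succ, ← mul_assoc]
      rw [mul_assoc _ _ p]  -- reorder
      calc (pvDivOut (ci / p) p).1 * (p ^ (pvDivOut (ci / p) p).2 * p)
          = ((pvDivOut (ci / p) p).1 * p ^ (pvDivOut (ci / p) p).2) * p := by ring
        _ = (ci / p) * p := by rw [h1]
        _ = ci := Nat.div_mul_cancel hdvd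
    · rw [dif_neg h]
      have hnd : ¬ p ∣ ci := by
        intro hd
        exact h ⟨hp, hci, Nat.eq_zero_of_dvd_of_lt hd |> fun _ => Nat.mod_eq_zero_of_dvd hd⟩
      exact ⟨by simp, hnd, hci⟩

lemma pvDivOut_fact (ci p : Nat) (hp : Nat.Prime p) (hci : 0 < ci) :
    (pvDivOut ci p).2 = ci.factorization p ∧ 0 < (pvDivOut ci p).1 ∧
      ∀ q, (pvDivOut ci p).1.factorization q = if q = p then 0 else ci.factorization q := by
  obtain ⟨heq, hnd, hpos⟩ := pvDivOut_spec p hp.two_le ci hci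
  have hc0 : (pvDivOut ci p).1 ≠ 0 := by omega
  have hfc : ci.factorization = (pvDivOut ci p).1.factorization + Finsupp.single p (pvDivOut ci p).2 := by
    conv_lhs => rw [← heq]
    rw [Nat.factorization_mul hc0 (pow_ne_zero _ hp.pos.ne'), hp.factorization_pow]
  have hcp : (pvDivOut ci p).1.factorization p = 0 := Nat.factorization_eq_zero_of_not_dvd hnd
  refine ⟨?_, hpos, ?_⟩
  · rw [hfc]; simp [Finsupp.add_apply, Finsupp.single_apply, hcp]
  · intro q
    by_cases hq : q = p
    · subst hq; simp [hcp]
    · rw [if_neg hq, hfc]; simp [Finsupp.add_apply, Finsupp.single_apply, Ne.symm hq]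

lemma pvInner_spec (i : Nat) : ∀ (L : List Nat) (ci : Nat),
    (∀ p ∈ L, Nat.Prime p) → L.Pairwise (· < ·) → 0 < ci →
    (((pvInner i L ci).1 = true ↔ ∃ p ∈ L, p * p ≤ i ∧ Odd (ci.factorization p))
     ∧ ((pvInner i L ci).1 = false →
        0 < (pvInner i L ci).2 ∧ ∀ q, Nat.Prime q →
          (pvInner i L ci).2.factorization q =
            if q ∈ L ∧ q * q ≤ i then 0 else ci.factorization q)) := by
  intro L
  induction L with
  | nil =>
    intro ci _ _ hci
    refine ⟨by simp [pvInner], fun _ => ⟨hci, fun q _ => by simp [pvInner]⟩⟩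
  | cons p rest ih =>
    intro ci hall hpw hci
    have hp : Nat.Prime p := hall p List.mem_cons_self
    have hallr : ∀ q ∈ rest, Nat.Prime q := fun q hq => hall q (List.mem_cons_of_mem p hq)
    have hpwr : rest.Pairwise (· < ·) := (List.pairwise_cons.mp hpw).2
    have hlt : ∀ q ∈ rest, p < q := (List.pairwise_cons.mp hpw).1
    by_cases hbig : p * p > i
    · have hval : pvInner i (p :: rest) ci = (false, ci) := by
        simp only [pvInner, if_pos hbig]
      rw [hval]
      have hno : ∀ q ∈ p :: rest, ¬ q * q ≤ i := by
        intro q hq hqi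
        rcases List.mem_cons.mp hq with rfl | hqr
        · omega
        · have h1 : p < q := hlt q hqr
          have : p * p < q * q := by nlinarith
          omega
      constructor
      · simp only [Bool.false_eq_true, false_iff]
        rintro ⟨q, hq, hqi, _⟩
        exact hno q hq hqi
      · intro _
        refine ⟨hci, fun q _ => ?_⟩
        rw [if_neg (fun h => hno q h.1 h.2)]
    · have hple : p * p ≤ i := by omega
      obtain ⟨he, hcpos, hfq⟩ := pvDivOut_fact ci p hp hci
      have hpnotr : p ∉ rest := fun h => absurd (hlt p h) (lt_irrefl p)
      by_cases hodd : (pvDivOut ci p).2 % 2 = 1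
      · have hval : pvInner i (p :: rest) ci = (true, (pvDivOut ci p).1) := by
          simp only [pvInner, if_neg hbig, if_pos hodd]
        rw [hval]
        constructor
        · simp only [true_iff]
          exact ⟨p, List.mem_cons_self, hple, by rw [← he]; exact Nat.odd_iff.mpr hodd⟩
        · intro hfalse; simp at hfalse
      · have hval : pvInner i (p :: rest) ci = pvInner i rest (pvDivOut ci p).1 := by
          simp only [pvInner, if_neg hbig, if_neg hodd]
        rw [hval]
        obtain ⟨ih1, ih2⟩ := ih (pvDivOut ci p).1 hallr hpwr hcpos
        constructor
        · rw [ih1]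
          constructor
          · rintro ⟨q, hq, hqi, hqodd⟩
            refine ⟨q, List.mem_cons_of_mem p hq, hqi, ?_⟩
            have hqp : q ≠ p := fun h => hpnotr (h ▸ hq)
            rwa [hfq q, if_neg hqp] at hqodd
          · rintro ⟨q, hq, hqi, hqodd⟩
            rcases List.mem_cons.mp hq with rfl | hqr
            · exfalso
              rw [← he] at hqodd
              rw [Nat.odd_iff] at hqodd
              exact hodd hqodd
            · refine ⟨q, hqr, hqi, ?_⟩
              have hqp : q ≠ p := fun h => hpnotr (h ▸ hqr)
              rwa [hfq q, if_neg hqp]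
        · intro hfalse
          obtain ⟨hpos2, hf2⟩ := ih2 hfalse
          refine ⟨hpos2, fun q hq => ?_⟩
          rw [hf2 q hq]
          by_cases hqp : q = p
          · subst hqp
            rw [if_neg (fun h => hpnotr h.1), if_pos ⟨List.mem_cons_self, hple⟩]
            have := hfq q
            rw [if_pos rfl] at this
            exact this
          · have hmem : (q ∈ rest ∧ q * q ≤ i) ↔ (q ∈ p :: rest ∧ q * q ≤ i) := by
              simp [List.mem_cons, hqp]
            rw [hfq q, if_neg hqp]
            by_cases hc : q ∈ rest ∧ q * q ≤ i
            · rw [if_pos hc, if_pos (hmem.mp hc)]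
            · rw [if_neg hc, if_neg (fun h => hc (hmem.mpr h))]

lemma pvInner_final (n i : Nat) (h2 : 2 ≤ i) (hin : i ≤ n) :
    (((pvInner i (primesL n) i).1 = false ∧ (pvInner i (primesL n) i).2 ≤ 1)
      ↔ Nat.sqrt i * Nat.sqrt i = i) := by
  have hn2 : 2 ≤ n := le_trans h2 hin
  have hall : ∀ p ∈ primesL n, Nat.Prime p := fun p hp => ((mem_primesL n p hn2).mp hp).1
  have hi0 : 0 < i := by omega
  obtain ⟨h1, h2'⟩ := pvInner_spec i (primesL n) i hall (pairwise_primesL n) hi0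
  rw [sq_iff_even_fact i (by omega)]
  constructor
  · rintro ⟨hf, hle⟩
    obtain ⟨hpos, hfq⟩ := h2' hf
    have hone : (pvInner i (primesL n) i).2 = 1 := by omega
    have hnotodd : ¬ ∃ p ∈ primesL n, p * p ≤ i ∧ Odd (i.factorization p) := by
      rw [← h1, hf]
      simp
    intro q hq
    by_cases hqi : q ∈ primesL n ∧ q * q ≤ i
    · rcases Nat.even_or_odd (i.factorization q) with hev | ho
      · exact hev
      · exact absurd ⟨q, hqi.1, hqi.2, ho⟩ hnotodd
    · have := hfq q hq
      rw [hone, if_neg hqi] at this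
      simp only [Nat.factorization_one, Finsupp.coe_zero, Pi.zero_apply] at this
      rw [← this]
      exact ⟨0, rfl⟩
  · intro hev
    have hf : (pvInner i (primesL n) i).1 = false := by
      cases hb : (pvInner i (primesL n) i).1
      · rfl
      · exfalso
        obtain ⟨q, hq, _, hodd⟩ := h1.mp hb
        have hqp : Nat.Prime q := hall q hq
        rw [Nat.odd_iff] at hodd
        have := hev q hqp
        rw [Nat.even_iff] at this
        omega
    refine ⟨hf, ?_⟩
    obtain ⟨hpos, hfq⟩ := h2' hf
    by_contra hgt
    have hne1 : (pvInner i (primesL n) i).2 ≠ 1 := by omega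
    obtain ⟨q, hq, hdvd⟩ := Nat.exists_prime_and_dvd hne1
    have hq0 : (pvInner i (primesL n) i).2.factorization q ≠ 0 := by
      have := (Nat.Prime.factorization_pos_of_dvd hq (by omega) hdvd)
      omega
    have hfact := hfq q hq
    by_cases hc : q ∈ primesL n ∧ q * q ≤ i
    · rw [if_pos hc] at hfact; omega
    · rw [if_neg hc] at hfact
      have hiq : i.factorization q ≠ 0 := by omega
      have hqdi : q ∣ i := Nat.dvd_of_factorization_pos hiq
      have hqle : q ≤ i := Nat.le_of_dvd hi0 hqdi
      have hqmem : q ∈ primesL n := (mem_primesL n q hn2).mpr ⟨hq, le_trans hqle hin⟩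
      have hqqi : ¬ q * q ≤ i := fun h => hc ⟨hqmem, h⟩
      have hev2 : 2 ≤ i.factorization q := by
        have := hev q hq
        rw [Nat.even_iff] at this
        omega
      have : q ^ 2 ∣ i := (Nat.Prime.pow_dvd_iff_le_factorization hq (by omega)).mpr hev2
      have : q ^ 2 ≤ i := Nat.le_of_dvd hi0 this
      rw [pow_two] at this
      omega

lemma mem_pvMults (i n j : Nat) (hi : 0 < i) : j ∈ pvMults i n ↔ (i ∣ j ∧ i ≤ j ∧ j ≤ n) := by
  simp only [pvMults, List.mem_map, List.mem_range]
  constructor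
  · rintro ⟨t, ht, rfl⟩
    have hle : t + 1 ≤ n / i := ht
    have hmul : (t + 1) * i ≤ n := (Nat.le_div_iff_mul_le hi).mp hle
    exact ⟨dvd_mul_left i (t + 1), Nat.le_mul_of_pos_left i (by omega), hmul⟩
  · rintro ⟨⟨s, rfl⟩, hle, hn⟩
    have hs : 1 ≤ s := by
      rcases Nat.eq_zero_or_pos s with rfl | h
      · simp at hle; omega
      · exact h
    refine ⟨s - 1, ?_, by rw [Nat.sub_add_cancel hs, mul_comm]⟩
    have : s * i ≤ n := by rwa [mul_comm] at hn
    have := (Nat.le_div_iff_mul_le hi).mpr this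
    omega

lemma pvMark_length : ∀ (l : List Nat) (np : List Bool), (pvMark np l).length = np.length := by
  intro l
  induction l with
  | nil => intro np; rfl
  | cons a l ih => intro np; simp only [pvMark, List.foldl_cons] at *; rw [ih]; simp

lemma pvMark_getD : ∀ (l : List Nat) (np : List Bool) (j : Nat),
    ((pvMark np l).getD j false = true ↔ ((j ∈ l ∧ j < np.length) ∨ np.getD j false = true)) := by
  intro l
  induction l with
  | nil => intro np j; simp [pvMark]
  | cons a l ih =>
    intro np j
    have step : pvMark np (a :: l) = pvMark (np.set a true) l := by
      simp [pvMark]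
    rw [step, ih]
    simp only [List.length_set, List.mem_cons]
    by_cases haj : a = j
    · subst haj
      by_cases hjl : a < np.length
      · simp [List.getD_eq_getElem?_getD, List.getElem?_set, hjl]
      · have h1 : (np.set a true).getD a false = np.getD a false := by
          simp [List.getD_eq_getElem?_getD, List.getElem?_set, hjl]
        rw [h1]
        constructor
        · rintro (⟨hm, hl⟩ | h) <;> [exact Or.inl ⟨Or.inr hm, hl⟩; exact Or.inr h]
        · rintro (⟨hm, hl⟩ | h)
          · omega
          · exact Or.inr h
    · have h1 : (np.set a true).getD j false = np.getD j false := by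
        simp [List.getD_eq_getElem?_getD, List.getElem?_set, haj]
      rw [h1]
      constructor
      · rintro (⟨hm, hl⟩ | h) <;> [exact Or.inl ⟨Or.inr hm, hl⟩; exact Or.inr h]
      · rintro (⟨hm | hm, hl⟩ | h)
        · exact absurd hm.symm haj
        · exact Or.inl ⟨hm, hl⟩
        · exact Or.inr h

lemma prime_iff_no_divisor (i : Nat) (h2 : 2 ≤ i) :
    Nat.Prime i ↔ ¬ ∃ k, 2 ≤ k ∧ k < i ∧ k ∣ i := by
  constructor
  · rintro hp ⟨k, hk2, hki, hkd⟩
    have := (Nat.prime_def_lt.mp hp).2 k hki hkd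
    omega
  · intro h
    rw [Nat.prime_def_lt]
    refine ⟨h2, fun m hm hd => ?_⟩
    by_contra hne
    have hm0 : m ≠ 0 := by
      rintro rfl
      rw [Nat.zero_dvd] at hd
      omega
    exact h ⟨m, by omega, hm, hd⟩

lemma sieve_inv (n : Nat) : ∀ t, t ≤ n - 1 →
    ((((List.range' 2 t).foldl (pvSieveStep n) (List.replicate (n+1) false, [])).1.length = n + 1)
    ∧ (∀ j, (((List.range' 2 t).foldl (pvSieveStep n) (List.replicate (n+1) false, [])).1.getD j false = true)
          ↔ ∃ k, 2 ≤ k ∧ k < 2 + t ∧ k ∣ j ∧ k ≤ j ∧ j ≤ n)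
    ∧ (((List.range' 2 t).foldl (pvSieveStep n) (List.replicate (n+1) false, [])).2
        = (List.range' 2 t).filter (fun p => decide (Nat.Prime p)))) := by
  intro t
  induction t with
  | zero =>
    intro _
    refine ⟨by simp, ?_, by simp⟩
    intro j
    simp [List.getD_eq_getElem?_getD, List.getElem?_replicate]
    constructor
    · intro h
      split at h <;> simp_all
    · rintro ⟨k, hk⟩; omega
  | succ t iht =>
    intro ht
    have hile : 2 + t ≤ n := by omega
    obtain ⟨ihl, ihg, ihp⟩ := iht (by omega)
    have hconcat : List.range' 2 (t + 1) = List.range' 2 t ++ [2 + t] := by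
      simpa using List.range'_concat (step := 1) (s := 2) (n := t)
    rw [hconcat, List.foldl_concat, List.filter_append]
    set st := (List.range' 2 t).foldl (pvSieveStep n) (List.replicate (n + 1) false, []) with hst
    refine ⟨?_, ?_, ?_⟩
    · show (pvMark _ _).length = n + 1
      rw [pvMark_length, ihl]
    · intro j
      show (pvMark _ _).getD j false = true ↔ _
      rw [pvMark_getD, ihl, mem_pvMults _ _ _ (by omega), ihg j]
      constructor
      · rintro (⟨⟨hdvd, hle, hjn⟩, _⟩ | ⟨k, hk2, hklt, hkd, hkj, hjn⟩)
        · exact ⟨2 + t, by omega, by omega, hdvd, hle, hjn⟩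
        · exact ⟨k, hk2, by omega, hkd, hkj, hjn⟩
      · rintro ⟨k, hk2, hklt, hkd, hkj, hjn⟩
        by_cases hk' : k < 2 + t
        · exact Or.inr ⟨k, hk2, hk', hkd, hkj, hjn⟩
        · have hkeq : k = 2 + t := by omega
          subst hkeq
          exact Or.inl ⟨⟨hkd, hkj, hjn⟩, by omega⟩
    · show (if st.1.getD (2 + t) false = false then st.2 ++ [2 + t] else st.2) = _
      have hgd : st.1.getD (2 + t) false = true ↔ ∃ k, 2 ≤ k ∧ k < 2 + t ∧ k ∣ (2 + t) := by
        rw [ihg (2 + t)]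
        constructor
        · rintro ⟨k, hk2, hklt, hkd, _, _⟩; exact ⟨k, hk2, hklt, hkd⟩
        · rintro ⟨k, hk2, hklt, hkd⟩
          exact ⟨k, hk2, hklt, hkd, Nat.le_of_dvd (by omega) hkd, hile⟩
      by_cases hpr : Nat.Prime (2 + t)
      · have hfalse : st.1.getD (2 + t) false = false := by
          cases hb : st.1.getD (2 + t) false
          · rfl
          · exfalso
            exact ((prime_iff_no_divisor (2 + t) (by omega)).mp hpr) (hgd.mp hb)
        rw [if_pos hfalse, ihp]
        simp [hpr]
      · have hdiv : ∃ k, 2 ≤ k ∧ k < 2 + t ∧ k ∣ (2 + t) := by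
          by_contra hno
          exact hpr ((prime_iff_no_divisor (2 + t) (by omega)).mpr
            (fun ⟨k, h1, h2, h3⟩ => hno ⟨k, h1, h2, h3⟩))
        have htrue : st.1.getD (2 + t) false = true := hgd.mpr hdiv
        rw [if_neg (by rw [htrue]; decide), ihp]
        simp [hpr]

lemma sieve_eq (n : Nat) (hn : 2 ≤ n) : pvSieve n (n + 1) = primesL n := by
  have h := (sieve_inv n (n - 1) le_rfl).2.2
  unfold pvSieve primesL
  exact h

lemma dpFold_length (P : List Nat) : ∀ (l : List Nat) (dp : List Int),
    (l.foldl (pvDpStep P) dp).length = dp.length := by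
  intro l
  induction l with
  | nil => intro dp; rfl
  | cons a l ih =>
    intro dp
    rw [List.foldl_cons, ih]
    simp only [pvDpStep]
    split <;> simp

lemma dpFold_get_notmem (P : List Nat) : ∀ (l : List Nat) (dp : List Int) (j : Nat), j ∉ l →
    (l.foldl (pvDpStep P) dp)[j]? = dp[j]? := by
  intro l
  induction l with
  | nil => intro dp j _; rfl
  | cons a l ih =>
    intro dp j hj
    rw [List.foldl_cons, ih _ _ (fun h => hj (List.mem_cons_of_mem a h))]
    have hja : a ≠ j := fun h => hj (h ▸ List.mem_cons_self)
    simp only [pvDpStep]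
    split
    · rw [List.getElem?_set, if_neg hja]
    · rfl

lemma dpFold_get_mem (P : List Nat) : ∀ (l : List Nat) (dp : List Int) (j : Nat), j ∈ l →
    l.Pairwise (· ≠ ·) → j < dp.length →
    (l.foldl (pvDpStep P) dp)[j]? =
      if (pvInner j P j).1 = true ∨ 1 < (pvInner j P j).2 then some 1 else dp[j]? := by
  intro l
  induction l with
  | nil => intro dp j hj; exact absurd hj (List.not_mem_nil)
  | cons a l ih =>
    intro dp j hj hpw hlen
    rw [List.foldl_cons]
    by_cases hja : j = a
    · subst hja
      have hnotl : j ∉ l := fun h => (List.pairwise_cons.mp hpw).1 j h rfl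
      rw [dpFold_get_notmem P l _ j hnotl]
      simp only [pvDpStep]
      split
      · rw [List.getElem?_set, if_pos rfl, if_pos hlen]
      · rfl
    · have hjl : j ∈ l := by
        rcases List.mem_cons.mp hj with h | h
        · exact absurd h hja
        · exact h
      have hlen' : j < (pvDpStep P dp a).length := by
        simp only [pvDpStep]; split <;> simp [hlen]
      rw [ih _ _ hjl (List.pairwise_cons.mp hpw).2 hlen']
      have : (pvDpStep P dp a)[j]? = dp[j]? := by
        simp only [pvDpStep]
        split
        · rw [List.getElem?_set, if_neg (fun h => hja h.symm)]
        · rfl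
      rw [this]

lemma init_get (n j : Nat) (hj : j < n) :
    (((List.replicate n (0 : Int)).set 0 0).set 1 0)[j]? = some 0 := by
  rw [List.getElem?_set, List.getElem?_set, List.getElem?_replicate]
  split_ifs <;> simp_all <;> omega

lemma A_eq_spec (limit : Int) (h : 2 ≤ limit) : dp_factor_parity limit = specList limit.toNat := by
  have hn2 : 2 ≤ limit.toNat := by omega
  simp only [dp_factor_parity]
  rw [sieve_eq limit.toNat hn2]
  apply List.ext_getElem?
  intro j
  have hleni : (((List.replicate limit.toNat (0 : Int)).set 0 0).set 1 0).length = limit.toNat := by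
    simp
  by_cases hj : j < limit.toNat
  · have hspec : (specList limit.toNat)[j]? = some (sqFlag j) := by
      simp [specList, hj]
    rw [hspec]
    by_cases h2j : 2 ≤ j
    · have hjmem : j ∈ List.range' 2 (limit.toNat - 2) := List.mem_range'_1.mpr ⟨h2j, by omega⟩
      have hpw : (List.range' 2 (limit.toNat - 2)).Pairwise (· ≠ ·) :=
        (List.pairwise_lt_range' 1).imp (fun h => ne_of_lt h)
      rw [dpFold_get_mem _ _ _ _ hjmem hpw (by rw [hleni]; exact hj)]
      have hfin := pvInner_final limit.toNat j h2j (by omega)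
      by_cases hsq : Nat.sqrt j * Nat.sqrt j = j
      · obtain ⟨hf, hle⟩ := hfin.mpr hsq
        have hnc : ¬ ((pvInner j (primesL limit.toNat) j).1 = true ∨
            1 < (pvInner j (primesL limit.toNat) j).2) := by
          rintro (hc | hc)
          · rw [hf] at hc; exact absurd hc (by simp)
          · omega
        rw [if_neg hnc, init_get _ _ hj]
        simp [sqFlag, hsq]
      · have hcond : (pvInner j (primesL limit.toNat) j).1 = true ∨
            1 < (pvInner j (primesL limit.toNat) j).2 := by
          by_contra hno
          push_neg at hno
          apply hsq
          apply hfin.mp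
          refine ⟨?_, by omega⟩
          cases hb : (pvInner j (primesL limit.toNat) j).1
          · rfl
          · exact absurd hb hno.1
        rw [if_pos hcond]
        simp [sqFlag, hsq]
    · have hnot : j ∉ List.range' 2 (limit.toNat - 2) := by
        intro hmem
        exact h2j (List.mem_range'_1.mp hmem).1
      rw [dpFold_get_notmem _ _ _ _ hnot, init_get _ _ hj]
      interval_cases j <;> simp [sqFlag]
  · rw [List.getElem?_eq_none, List.getElem?_eq_none]
    · simp [specList]; omega
    · rw [dpFold_length, hleni]; omega

lemma pvBLoop_aux (n : Nat) : ∀ d k (dp : List Int) (j : Nat), n - k ≤ d → j < n → dp.length = n →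
    ((pvBLoop n k dp).length = dp.length
    ∧ ((∃ m, k ≤ m ∧ m * m = j) → (pvBLoop n k dp)[j]? = some 0)
    ∧ ((∀ m, k ≤ m → m * m ≠ j) → (pvBLoop n k dp)[j]? = dp[j]?)) := by
  intro d
  induction d with
  | zero =>
    intro k dp j hd hj hlen
    have hkk : ¬ k * k < n := by
      intro hlt
      have : k ≤ k * k := by nlinarith
      omega
    rw [pvBLoop, dif_neg hkk]
    refine ⟨rfl, ?_, fun _ => rfl⟩
    rintro ⟨m, hkm, rfl⟩
    exfalso
    have : k * k ≤ m * m := Nat.mul_le_mul hkm hkm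
    omega
  | succ d ih =>
    intro k dp j hd hj hlen
    rw [pvBLoop]
    by_cases h : k * k < n
    · rw [dif_pos h]
      have hk : k ≤ k * k := by nlinarith
      have hkn : k < n := by omega
      obtain ⟨ihl, ih1, ih2⟩ := ih (k + 1) (dp.set (k * k) 0) j (by omega) hj (by simp [hlen])
      refine ⟨by rw [ihl]; simp, ?_, ?_⟩
      · rintro ⟨m, hkm, hmm⟩
        rcases Nat.lt_or_ge k m with hlt | hge
        · exact ih1 ⟨m, by omega, hmm⟩
        · have hmk : m = k := by omega
          subst hmk
          rw [ih2 (fun m' hm' hne => by nlinarith)]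
          rw [← hmm, List.getElem?_set, if_pos rfl, if_pos (by omega)]
      · intro hno
        rw [ih2 (fun m hm => hno m (by omega))]
        rw [List.getElem?_set, if_neg (hno k le_rfl)]
    · rw [dif_neg h]
      refine ⟨rfl, ?_, fun _ => rfl⟩
      rintro ⟨m, hkm, rfl⟩
      exfalso
      have h1 : k ≤ k * k := by nlinarith
      have h2 : k * k ≤ m * m := Nat.mul_le_mul hkm hkm
      omega

lemma pvBLoop_length (n k : Nat) (dp : List Int) : (pvBLoop n k dp).length = dp.length := by
  induction k, dp using pvBLoop.induct n with
  | case1 k dp h ih => rw [pvBLoop, dif_pos h, ih]; simp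
  | case2 k dp h => rw [pvBLoop, dif_neg h]

lemma B_eq_spec (limit : Int) : dp_factor_parity_alt limit = specList limit.toNat := by
  apply List.ext_getElem?
  intro j
  by_cases hj : j < limit.toNat
  · have hspec : (specList limit.toNat)[j]? = some (sqFlag j) := by
      simp [specList, List.getElem?_map, List.getElem?_range, hj]
    rw [hspec]
    obtain ⟨_, g1, g2⟩ := pvBLoop_aux limit.toNat (limit.toNat - 0) 0
      (List.replicate limit.toNat 1) j le_rfl hj (by simp)
    unfold dp_factor_parity_alt
    by_cases hsq : Nat.sqrt j * Nat.sqrt j = j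
    · rw [g1 ⟨Nat.sqrt j, Nat.zero_le _, hsq⟩]
      simp [sqFlag, hsq]
    · rw [g2 ?hno]
      case hno =>
        intro m _ hmm
        apply hsq
        have : Nat.sqrt j = m := by rw [← hmm, ← pow_two, Nat.sqrt_eq']
        rw [this, hmm]
      simp [sqFlag, hsq, List.getElem?_replicate, hj]
  · rw [List.getElem?_eq_none, List.getElem?_eq_none]
    · simp [specList]; omega
    · unfold dp_factor_parity_alt
      rw [pvBLoop_length]
      simp; omega

-- ===== VERDICT (by name: the statement is the Claim_ definition above) =====
theorem dp_factor_parity_spec : Claim_equal_dp_factor_parity := by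
  intro limit _ hpre
  unfold Spec_dp_factor_parity
  rw [A_eq_spec limit hpre, B_eq_spec]
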